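-- pv_equiv track=rewrite | github.com/EricRenart/LOS_Generator | LOSGenerator.py | _split_by_node
-- ===== SOURCE A (Python) =====
-- def _split_by_node(lines):
--     node_lines = []
--     intersection_lines = []
--     names = []
--     name_line = False
--
--     for line in lines:
--         if line.startswith("Lanes, Volumes, Timings"):
--             if intersection_lines:
--                 name_line = True # Next line is the intersection name
--                 node_lines.append(intersection_lines)
--             if name_line:
--                 name_line = False
--                 name = line.split(":\t")[1].strip()
--                 names.append(name)
--             intersection_lines = []
--         intersection_lines.append(line)
--
--     # Append last node
--     if intersection_lines:
--         node_lines.append(intersection_lines)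
--
--     return (node_lines, names)
-- ===== SOURCE B (Python) =====
-- def _split_by_node(lines):
--     hdr = "Lanes, Volumes, Timings"
--     lines = list(lines)
--     cuts = [0] + [i for i, l in enumerate(lines) if l.startswith(hdr)] + [len(lines)]
--     node_lines = [lines[a:b] for a, b in zip(cuts, cuts[1:]) if a < b]
--     names = [l.split(":\t")[1].strip() for i, l in enumerate(lines) if i > 0 and l.startswith(hdr)]
--     return (node_lines, names)
-- ===== Notes on version B (the rewrite author's own statement) =====
-- stated objective: alternative
-- what changed: Replaces the single-pass accumulator/flag loop by an index-based decomposition: collect all header indices first, slice the line list at those cut points to form the node groups, and extract names in a separate pass over the headers at positive index.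
import Mathlib
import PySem

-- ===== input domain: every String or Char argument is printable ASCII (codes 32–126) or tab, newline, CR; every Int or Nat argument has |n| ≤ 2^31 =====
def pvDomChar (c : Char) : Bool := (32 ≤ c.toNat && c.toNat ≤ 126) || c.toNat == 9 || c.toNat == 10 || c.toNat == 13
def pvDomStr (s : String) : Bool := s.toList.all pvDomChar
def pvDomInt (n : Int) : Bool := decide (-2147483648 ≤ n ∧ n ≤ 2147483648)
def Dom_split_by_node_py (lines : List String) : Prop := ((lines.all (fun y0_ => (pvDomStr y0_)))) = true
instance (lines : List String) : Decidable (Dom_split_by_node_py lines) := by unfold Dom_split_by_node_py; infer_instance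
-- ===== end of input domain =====

-- B re-implements the same split with a different decomposition: it gathers all header-line
-- indices first, slices the line list at those cut points to form the node groups, and reads
-- the names in a separate pass over headers at positive index (alternative, same cost).
-- Return value only; neither version mutates its argument.

-- helpers shared by the two ports (abbreviations of Python idioms appearing in both sources)
def pvIsHdr (l : String) : Bool := PySem.Str.startswith l "Lanes, Volumes, Timings"
def pvNameOf (l : String) : String :=
  PySem.Str.strip ((PySem.List.pyGet? ((PySem.Str.split? l ":\t").getD []) 1).getD "")

-- ===== PORT A =====
-- the body of A's for-loop, acting on the state (node_lines, intersection_lines, names, name_line)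
def pvStepA (st : List (List String) × List String × List String × Bool) (line : String) :
    List (List String) × List String × List String × Bool :=
  if pvIsHdr line then
    -- 'if intersection_lines:' block (may set name_line and append the finished node)
    let p1 : List (List String) × Bool :=
      if st.2.1 ≠ [] then (st.1 ++ [st.2.1], true) else (st.1, st.2.2.2)
    -- 'if name_line:' block (extracts the name from the current header line)
    let p2 : List String × Bool :=
      if p1.2 then (st.2.2.1 ++ [pvNameOf line], false) else (st.2.2.1, p1.2)
    (p1.1, [line], p2.1, p2.2)
  else
    (st.1, st.2.1 ++ [line], st.2.2.1, st.2.2.2)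

def split_by_node_py (lines : List String) : List (List String) × List String :=
  let st := lines.foldl pvStepA ([], [], [], false)
  -- 'if intersection_lines: node_lines.append(intersection_lines)' then return
  (st.1 ++ (if st.2.1 ≠ [] then [st.2.1] else []), st.2.2.1)

-- ===== PORT B =====
def split_by_node_py_alt (lines : List String) : List (List String) × List String :=
  let hdrIdx : List Int := (PySem.List.enumerate lines 0).filterMap
      (fun p => if pvIsHdr p.2 then some p.1 else none)
  let cuts : List Int := 0 :: (hdrIdx ++ [(lines.length : Int)])
  let node_lines := (cuts.zip cuts.tail).filterMap
      (fun ab => if ab.1 < ab.2 then some (PySem.List.slice lines (some ab.1) (some ab.2)) else none)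
  let names := (PySem.List.enumerate lines 0).filterMap
      (fun p => if 0 < p.1 ∧ pvIsHdr p.2 then some (pvNameOf p.2) else none)
  (node_lines, names)

-- ===== PRECONDITION & SPEC =====
-- Pre_ excludes exactly the inputs on which Python A (and B alike) raises IndexError:
-- a header line at a positive index that does not contain ":\t".
def Pre_split_by_node_py (lines : List String) : Prop :=
  ∀ l ∈ lines.tail, pvIsHdr l = true → PySem.Str.isIn ":\t" l = true
instance (lines : List String) : Decidable (Pre_split_by_node_py lines) := by
  unfold Pre_split_by_node_py; infer_instance
def pvWitness_split_by_node_py : List String :=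
  ["pre", "Lanes, Volumes, Timings 3: 1:\tAlpha / Beta", "x", "Lanes, Volumes, Timings:\tGamma"]

def Spec_split_by_node_py (lines : List String) (out : List (List String) × List String) : Prop := out = split_by_node_py_alt lines
instance (lines : List String) (out : List (List String) × List String) : Decidable (Spec_split_by_node_py lines out) := by unfold Spec_split_by_node_py; infer_instance

-- ===== CLAIM (what is proved, stated in full; the proofs are below) =====
def Claim_equal_split_by_node_py : Prop := ∀ (lines : List String), Dom_split_by_node_py lines → Pre_split_by_node_py lines → Spec_split_by_node_py lines (split_by_node_py lines)

-- ===== LEMMAS AND PROOFS =====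

-- the loop of A as a structural recursion: given the currently open group `il`,
-- produce (closed groups, final open group, names)
def pvS : List String → List String → List (List String) × List String × List String
  | il, [] => ([], il, [])
  | il, l :: r =>
    if pvIsHdr l then
      let t := pvS [l] r
      if il = [] then t else (il :: t.1, t.2.1, pvNameOf l :: t.2.2)
    else pvS (il ++ [l]) r

-- names of all header lines of a list, in order
def pvHdrNames : List String → List String
  | [] => []
  | l :: r => (if pvIsHdr l then [pvNameOf l] else []) ++ pvHdrNames r

-- header indices of a list, starting the numbering at s
def pvIdx : Int → List String → List Int
  | _, [] => []
  | s, l :: r => (if pvIsHdr l then [s] else []) ++ pvIdx (s + 1) r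

-- the groups of `h :: d` where h is a header line: cut before each later header
def pvGroups (h : String) (d : List String) : List (List String) :=
  match hd : d.dropWhile (fun l => !pvIsHdr l) with
  | [] => [h :: d]
  | h2 :: d2 => (h :: d.takeWhile (fun l => !pvIsHdr l)) :: pvGroups h2 d2
termination_by d.length
decreasing_by
  have h1 : (d.dropWhile (fun l => !pvIsHdr l)).length ≤ d.length :=
    d.length_dropWhile_le _
  rw [hd] at h1
  simp at h1
  omega

-- consecutive-cut segments: previous cut a, remaining cuts cs
def pvSegs (full : List String) : Int → List Int → List (List String)
  | _, [] => []
  | a, b :: cs =>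
    (if a < b then [PySem.List.slice full (some a) (some b)] else []) ++ pvSegs full b cs

lemma pvGroups_nohdr (h : String) (d : List String)
    (hd : d.dropWhile (fun l => !pvIsHdr l) = []) : pvGroups h d = [h :: d] := by
  rw [pvGroups]
  split <;> simp_all

lemma pvGroups_hdr (h h2 : String) (d d2 : List String)
    (hd : d.dropWhile (fun l => !pvIsHdr l) = h2 :: d2) :
    pvGroups h d = (h :: d.takeWhile (fun l => !pvIsHdr l)) :: pvGroups h2 d2 := by
  rw [pvGroups]
  split <;> simp_all

lemma pvDropWhile_head {α : Type} (p : α → Bool) :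
    ∀ (l : List α) (h : α) (t : List α), l.dropWhile p = h :: t → p h = false := by
  intro l
  induction l with
  | nil => intro h t hd; simp at hd
  | cons a l ih =>
    intro h t hd
    rw [List.dropWhile_cons] at hd
    by_cases ha : p a
    · simp [ha] at hd
      exact ih h t hd
    · simp [ha] at hd
      obtain ⟨rfl, rfl⟩ := hd
      simpa using ha

-- ===== A-side characterisation =====

lemma pvA_fold (r : List String) : ∀ (nl : List (List String)) (il nm : List String),
    r.foldl pvStepA (nl, il, nm, false) =
      (nl ++ (pvS il r).1, (pvS il r).2.1, nm ++ (pvS il r).2.2, false) := by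
  induction r with
  | nil => intro nl il nm; simp [pvS]
  | cons l r ih =>
    intro nl il nm
    by_cases hl : pvIsHdr l
    · by_cases hil : il = []
      · subst hil
        simp only [List.foldl_cons]
        have hstep : pvStepA (nl, ([] : List String), nm, false) l = (nl, [l], nm, false) := by
          simp [pvStepA, hl]
        rw [hstep, ih]
        simp [pvS, hl]
      · simp only [List.foldl_cons]
        have hstep : pvStepA (nl, il, nm, false) l =
            (nl ++ [il], [l], nm ++ [pvNameOf l], false) := by
          simp [pvStepA, hl, hil]
        rw [hstep, ih]
        simp [pvS, hl, hil, List.append_assoc]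
    · simp only [List.foldl_cons]
      have hstep : pvStepA (nl, il, nm, false) l = (nl, il ++ [l], nm, false) := by
        simp [pvStepA, hl]
      rw [hstep, ih]
      simp [pvS, hl]

lemma pvA_eq (lines : List String) :
    split_by_node_py lines =
      ((pvS [] lines).1 ++ (if (pvS [] lines).2.1 = [] then [] else [(pvS [] lines).2.1]),
        (pvS [] lines).2.2) := by
  show (let st := lines.foldl pvStepA ([], [], [], false)
        (st.1 ++ (if st.2.1 ≠ [] then [st.2.1] else []), st.2.2.1)) = _
  rw [pvA_fold lines [] [] []]
  by_cases hf : (pvS [] lines).2.1 = [] <;> simp [hf]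

-- span characterisation of pvS
lemma pvS_nohdr (r : List String) : ∀ il, r.dropWhile (fun l => !pvIsHdr l) = [] →
    pvS il r = ([], il ++ r, []) := by
  induction r with
  | nil => intro il _; simp [pvS]
  | cons l r ih =>
    intro il h
    rw [List.dropWhile_cons] at h
    by_cases hl : pvIsHdr l
    · simp [hl] at h
    · simp [hl] at h
      have h' : r.dropWhile (fun l => !pvIsHdr l) = [] := by simpa using h
      simp [pvS, hl, ih _ h']

lemma pvS_hdr (r : List String) : ∀ il h d, r.dropWhile (fun l => !pvIsHdr l) = h :: d →
    pvS il r =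
      (if il ++ r.takeWhile (fun l => !pvIsHdr l) = [] then pvS [h] d
       else ((il ++ r.takeWhile (fun l => !pvIsHdr l)) :: (pvS [h] d).1,
             (pvS [h] d).2.1, pvNameOf h :: (pvS [h] d).2.2)) := by
  induction r with
  | nil => intro il h d hd; simp at hd
  | cons l r ih =>
    intro il h d hd
    rw [List.dropWhile_cons] at hd
    by_cases hl : pvIsHdr l
    · simp [hl] at hd
      obtain ⟨rfl, rfl⟩ := hd
      simp [pvS, hl, List.takeWhile_cons]
    · simp [hl] at hd
      have := ih (il ++ [l]) h d hd
      simp [pvS, hl, this]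

-- the open group stays nonempty
lemma pvS_f_ne (r : List String) : ∀ il, il ≠ [] → (pvS il r).2.1 ≠ [] := by
  induction r with
  | nil => intro il h; simpa [pvS]
  | cons l r ih =>
    intro il h
    by_cases hl : pvIsHdr l
    · by_cases hil : il = []
      · exact absurd hil h
      · simpa [pvS, hl, hil] using ih [l] (by simp)
    · simpa [pvS, hl] using ih (il ++ [l]) (by simp)

-- names collected by pvS from a nonempty open group: all headers of r
lemma pvS_names (r : List String) : ∀ il, il ≠ [] → (pvS il r).2.2 = pvHdrNames r := by
  induction r with
  | nil => intro il _; simp [pvS, pvHdrNames]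
  | cons l r ih =>
    intro il h
    by_cases hl : pvIsHdr l
    · simp [pvS, hl, h, pvHdrNames, ih [l] (by simp)]
    · simp [pvS, hl, pvHdrNames, ih (il ++ [l]) (by simp)]

-- groups assembled by pvS from a single-header open group
lemma pvA_groups (h : String) (d : List String) :
    (pvS [h] d).1 ++ [(pvS [h] d).2.1] = pvGroups h d := by
  induction h, d using pvGroups.induct with
  | case1 h d hd =>
    rw [pvS_nohdr d [h] hd, pvGroups_nohdr h d hd]
    simp
  | case2 h d h2 d2 hd ih =>
    rw [pvS_hdr d [h] h2 d2 hd, pvGroups_hdr h h2 d d2 hd]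
    simp [ih]

-- ===== B-side characterisation =====

lemma pvEnum_idx (r : List String) : ∀ (s : Int),
    (PySem.List.enumerate r s).filterMap
        (fun p => if pvIsHdr p.2 then some p.1 else none) = pvIdx s r := by
  induction r with
  | nil => intro s; simp [PySem.List.enumerate_nil, pvIdx]
  | cons l r ih =>
    intro s
    rw [PySem.List.enumerate_cons]
    by_cases hl : pvIsHdr l <;> simp [hl, pvIdx, ih]

lemma pvEnum_names_pos (r : List String) : ∀ (s : Int), 1 ≤ s →
    (PySem.List.enumerate r s).filterMap
        (fun p => if 0 < p.1 ∧ pvIsHdr p.2 then some (pvNameOf p.2) else none)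
      = pvHdrNames r := by
  induction r with
  | nil => intro s _; simp [PySem.List.enumerate_nil, pvHdrNames]
  | cons l r ih =>
    intro s hs
    rw [PySem.List.enumerate_cons]
    have hpos : (0 : Int) < s := by omega
    by_cases hl : pvIsHdr l <;> simp [hl, hpos, pvHdrNames, ih (s + 1) (by omega)]

lemma pvB_names (lines : List String) :
    (split_by_node_py_alt lines).2 = pvHdrNames lines.tail := by
  cases lines with
  | nil => simp [split_by_node_py_alt, PySem.List.enumerate_nil, pvHdrNames]
  | cons l r =>
    show ((PySem.List.enumerate (l :: r) 0).filterMap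
      (fun p => if 0 < p.1 ∧ pvIsHdr p.2 then some (pvNameOf p.2) else none)) = _
    rw [PySem.List.enumerate_cons]
    simp [pvEnum_names_pos r 1 (by omega)]

lemma pvZip_segs (full : List String) (cs : List Int) : ∀ (a : Int),
    ((a :: cs).zip cs).filterMap
        (fun ab => if ab.1 < ab.2 then
            some (PySem.List.slice full (some ab.1) (some ab.2)) else none)
      = pvSegs full a cs := by
  induction cs with
  | nil => intro a; simp [pvSegs]
  | cons b cs ih =>
    intro a
    rw [List.zip_cons_cons]
    by_cases hab : a < b <;> simp [hab, pvSegs, ih b]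

lemma pvB_nodes (lines : List String) :
    (split_by_node_py_alt lines).1 =
      pvSegs lines 0 (pvIdx 0 lines ++ [(lines.length : Int)]) := by
  show ((((0 : Int) :: _).zip _).filterMap _) = _
  rw [List.tail_cons, pvEnum_idx lines 0, pvZip_segs]

lemma pvIdx_nil (r : List String) : ∀ (s : Int), (∀ l ∈ r, pvIsHdr l = false) →
    pvIdx s r = [] := by
  induction r with
  | nil => intro s _; simp [pvIdx]
  | cons l r ih =>
    intro s h
    have hl := h l (by simp)
    simp [pvIdx, hl, ih (s + 1) (fun x hx => h x (by simp [hx]))]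

lemma pvIdx_append (xs : List String) : ∀ (ys : List String) (s : Int),
    pvIdx s (xs ++ ys) = pvIdx s xs ++ pvIdx (s + xs.length) ys := by
  induction xs with
  | nil => intro ys s; simp [pvIdx]
  | cons x xs ih =>
    intro ys s
    have harith : s + ((x :: xs).length : Int) = s + 1 + (xs.length : Int) := by
      push_cast [List.length_cons]; ring
    rw [harith]
    by_cases hx : pvIsHdr x <;> simp [pvIdx, hx, ih ys (s + 1)]

lemma pvHdrNames_append (xs ys : List String) :
    pvHdrNames (xs ++ ys) = pvHdrNames xs ++ pvHdrNames ys := by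
  induction xs with
  | nil => simp [pvHdrNames]
  | cons x xs ih => by_cases hx : pvIsHdr x <;> simp [pvHdrNames, hx, ih]

lemma pvHdrNames_nil (xs : List String) (h : ∀ l ∈ xs, pvIsHdr l = false) :
    pvHdrNames xs = [] := by
  induction xs with
  | nil => simp [pvHdrNames]
  | cons x xs ih =>
    simp [pvHdrNames, h x (by simp), ih (fun l hl => h l (by simp [hl]))]

-- the central slice computation: one segment of the concatenation
lemma pvSlice_seg (pre mid post : List String) :
    PySem.List.slice (pre ++ mid ++ post) (some (pre.length : Int))
        (some ((pre.length : Int) + (mid.length : Int))) = mid := by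
  rw [PySem.List.slice_natCast_add]
  rw [List.append_assoc, List.drop_left, List.take_left]

-- B's segments of pre ++ h :: d, cut at the headers of d, are exactly the groups
lemma pvB_groups (h : String) (d : List String) : ∀ (pre : List String),
    pvSegs (pre ++ h :: d) (pre.length : Int)
        (pvIdx ((pre.length : Int) + 1) d ++ [(pre.length : Int) + 1 + (d.length : Int)])
      = pvGroups h d := by
  induction h, d using pvGroups.induct with
  | case1 h d hd =>
    intro pre
    have hall : ∀ l ∈ d, pvIsHdr l = false := by
      intro l hl
      have := (List.dropWhile_eq_nil_iff.1 hd) l hl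
      simpa using this
    rw [pvIdx_nil d _ hall, pvGroups_nohdr h d hd]
    have hlt : (pre.length : Int) < (pre.length : Int) + 1 + (d.length : Int) := by
      have : (0 : Int) ≤ (d.length : Int) := Int.natCast_nonneg _
      omega
    have hcut : (pre.length : Int) + 1 + (d.length : Int) =
        (pre.length : Int) + ((h :: d).length : Int) := by
      push_cast [List.length_cons]; ring
    have hsl : PySem.List.slice (pre ++ h :: d) (some (pre.length : Int))
        (some ((pre.length : Int) + 1 + (d.length : Int))) = h :: d := by
      rw [hcut]
      have := pvSlice_seg pre (h :: d) []
      simpa using this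
    simp [pvSegs, hlt, hsl]
  | case2 h d h2 d2 hd ih =>
    intro pre
    set q : String → Bool := fun l => !pvIsHdr l with hq
    have hdecomp : d = d.takeWhile q ++ h2 :: d2 := by
      conv_lhs => rw [← List.takeWhile_append_dropWhile (p := q) (l := d)]
      rw [hd]
    set tw := d.takeWhile q with htw
    have htwall : ∀ l ∈ tw, pvIsHdr l = false := by
      intro l hl
      have := List.mem_takeWhile_imp hl
      simpa [hq] using this
    have hh2 : pvIsHdr h2 = true := by
      have := pvDropWhile_head q d h2 d2 hd
      simpa [hq] using this
    -- compute the index list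
    have hidx : pvIdx ((pre.length : Int) + 1) d =
        ((pre.length : Int) + 1 + (tw.length : Int)) ::
          pvIdx ((pre.length : Int) + 1 + (tw.length : Int) + 1) d2 := by
      conv_lhs => rw [hdecomp]
      rw [pvIdx_append, pvIdx_nil tw _ htwall]
      simp [pvIdx, hh2]
    rw [hidx, pvGroups_hdr h h2 d d2 hd]
    have hlt : (pre.length : Int) < (pre.length : Int) + 1 + (tw.length : Int) := by
      have : (0 : Int) ≤ (tw.length : Int) := Int.natCast_nonneg _
      omega
    have hfull : pre ++ h :: d = (pre ++ h :: tw) ++ h2 :: d2 := by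
      conv_lhs => rw [hdecomp]
      simp
    have hsl : PySem.List.slice (pre ++ h :: d) (some (pre.length : Int))
        (some ((pre.length : Int) + 1 + (tw.length : Int))) = h :: tw := by
      have hcut : (pre.length : Int) + 1 + (tw.length : Int) =
          (pre.length : Int) + ((h :: tw).length : Int) := by
        push_cast [List.length_cons]; ring
      rw [hcut, hfull]
      have := pvSlice_seg pre (h :: tw) (h2 :: d2)
      simpa [List.append_assoc] using this
    have hlen2 : ((pre ++ h :: tw).length : Int) = (pre.length : Int) + 1 + (tw.length : Int) := by
      push_cast [List.length_append, List.length_cons]; ring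
    have htail : (pre.length : Int) + 1 + (d.length : Int) =
        ((pre ++ h :: tw).length : Int) + 1 + (d2.length : Int) := by
      have hdl2 : d.length = tw.length + 1 + d2.length := by
        conv_lhs => rw [hdecomp]
        simp [List.length_append, List.length_cons]; omega
      rw [hlen2, hdl2]; push_cast; ring
    have hrec : pvSegs (pre ++ h :: d) ((pre.length : Int) + 1 + (tw.length : Int))
        (pvIdx ((pre.length : Int) + 1 + (tw.length : Int) + 1) d2
          ++ [(pre.length : Int) + 1 + (d.length : Int)]) = pvGroups h2 d2 := by
      rw [htail, hfull, ← hlen2]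
      exact ih (pre ++ h :: tw)
    simp only [List.cons_append, pvSegs]
    rw [if_pos hlt, hsl, hrec, List.singleton_append, htw]

-- ===== VERDICT (by name: the statement is the Claim_ definition above) =====
theorem split_by_node_py_spec : Claim_equal_split_by_node_py := by
  intro lines _ _
  show split_by_node_py lines = split_by_node_py_alt lines
  rw [pvA_eq lines]
  have hB : split_by_node_py_alt lines =
      ((split_by_node_py_alt lines).1, (split_by_node_py_alt lines).2) := rfl
  rw [hB, pvB_nodes lines, pvB_names lines]
  set q : String → Bool := fun l => !pvIsHdr l with hq
  rcases hdl : lines.dropWhile q with _ | ⟨h, d⟩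
  · -- no header line at all
    have hall : ∀ l ∈ lines, pvIsHdr l = false := by
      intro l hl
      have := (List.dropWhile_eq_nil_iff.1 hdl) l hl
      simpa [hq] using this
    rw [pvS_nohdr lines [] (by simpa [hq] using hdl)]
    rw [pvIdx_nil lines 0 hall]
    have htail : pvHdrNames lines.tail = [] :=
      pvHdrNames_nil _ (fun l hl => hall l (List.mem_of_mem_tail hl))
    cases lines with
    | nil => simp [pvSegs, pvHdrNames]
    | cons l r =>
      have hlt : (0 : Int) < ((l :: r).length : Int) := by
        simp
      have hsl : PySem.List.slice (l :: r) none (some ((r.length : Int) + 1)) = l :: r := by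
        have h1 : (r.length : Int) + 1 = (((r.length + 1 : Nat)) : Int) := by push_cast; ring
        rw [h1, PySem.List.slice_to_natCast]
        simp
      have htail' : pvHdrNames r = [] := by simpa using htail
      simp [pvSegs, hlt, hsl, htail']
  · -- lines = tw ++ h :: d with tw header-free
    have hdecomp : lines = lines.takeWhile q ++ h :: d := by
      conv_lhs => rw [← List.takeWhile_append_dropWhile (p := q) (l := lines)]
      rw [hdl]
    set tw := lines.takeWhile q with htw
    have htwall : ∀ l ∈ tw, pvIsHdr l = false := by
      intro l hl
      have := List.mem_takeWhile_imp hl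
      simpa [hq] using this
    have hh : pvIsHdr h = true := by
      have := pvDropWhile_head q lines h d hdl
      simpa [hq] using this
    -- index list of lines
    have hidx : pvIdx 0 lines = (tw.length : Int) :: pvIdx ((tw.length : Int) + 1) d := by
      conv_lhs => rw [hdecomp]
      rw [pvIdx_append, pvIdx_nil tw _ htwall]
      simp [pvIdx, hh]
    have hlen : (lines.length : Int) = (tw.length : Int) + 1 + (d.length : Int) := by
      conv_lhs => rw [hdecomp]
      push_cast [List.length_append, List.length_cons]; ring
    -- B's node list
    have hBgroups : pvSegs lines (tw.length : Int)
        (pvIdx ((tw.length : Int) + 1) d ++ [(lines.length : Int)]) = pvGroups h d := by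
      rw [hlen]
      conv_lhs => rw [hdecomp]
      exact pvB_groups h d tw
    have hBnodes : pvSegs lines 0 (pvIdx 0 lines ++ [(lines.length : Int)]) =
        (if tw = [] then [] else [tw]) ++ pvGroups h d := by
      rw [hidx]
      by_cases htwnil : tw = []
      · have h0 : (tw.length : Int) = 0 := by rw [htwnil]; simp
        rw [h0] at hBgroups ⊢
        simpa [pvSegs, htwnil] using hBgroups
      · have hlt : (0 : Int) < (tw.length : Int) := by
          have hz : tw.length ≠ 0 := fun h0 => htwnil (List.eq_nil_of_length_eq_zero h0)
          omega
        have hsl : PySem.List.slice lines (some (0 : Int)) (some (tw.length : Int)) = tw := by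
          conv_lhs => rw [hdecomp]
          have := pvSlice_seg [] tw (h :: d)
          simpa using this
        simp only [pvSegs, List.cons_append, hlt, if_pos, htwnil, if_neg]
        simp [hsl, hBgroups]
    -- B's names
    have hBnames : pvHdrNames lines.tail = (if tw = [] then [] else [pvNameOf h]) ++ pvHdrNames d := by
      by_cases htwnil : tw = []
      · have : lines = h :: d := by rw [hdecomp, htwnil]; simp
        simp [this, htwnil]
      · cases htww : tw with
        | nil => exact absurd htww htwnil
        | cons t0 tw0 =>
          have hlines : lines = t0 :: (tw0 ++ h :: d) := by
            rw [hdecomp, htww]; simp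
          have htw0 : ∀ l ∈ tw0, pvIsHdr l = false := by
            intro l hl; exact htwall l (by simp [htww, hl])
          rw [hlines]
          simp only [List.tail_cons, pvHdrNames_append]
          rw [pvHdrNames_nil tw0 htw0]
          simp [pvHdrNames, hh, htwnil]
    -- A's result, by cases on tw
    rw [pvS_hdr lines [] h d (by simpa [hq] using hdl)]
    rw [← htw]
    have hf := pvS_f_ne d [h] (by simp)
    rw [hBnodes, hBnames]
    by_cases htwnil : tw = []
    · simp [htwnil, hf, ← pvA_groups h d, pvS_names d [h] (by simp)]
    · simp [htwnil, hf, ← pvA_groups h d, pvS_names d [h] (by simp)]
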